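-- pv_equiv track=rewrite | github.com/milletyann/InstaCleanAndScrap | cleaner.py | isalphanum
-- ===== SOURCE A (Python) =====
-- def isalphanum(string):
--     dic = [
--         "a",
--         "b",
--         "c",
--         "d",
--         "e",
--         "f",
--         "g",
--         "h",
--         "i",
--         "j",
--         "k",
--         "l",
--         "m",
--         "n",
--         "o",
--         "p",
--         "q",
--         "r",
--         "s",
--         "t",
--         "u",
--         "v",
--         "w",
--         "x",
--         "y",
--         "z",
--         "A",
--         "B",
--         "C",
--         "D",
--         "E",
--         "F",
--         "G",
--         "H",
--         "I",
--         "J",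
--         "K",
--         "L",
--         "M",
--         "N",
--         "O",
--         "P",
--         "Q",
--         "R",
--         "S",
--         "T",
--         "U",
--         "V",
--         "W",
--         "X",
--         "Y",
--         "Z",
--         "1",
--         "2",
--         "3",
--         "4",
--         "5",
--         "6",
--         "7",
--         "8",
--         "9",
--         "0",
--         "-",
--         "_",
--     ]
--     l = []
--     for char in string:
--         if not (char in dic):
--             return False
--     return True
-- ===== SOURCE B (Python) =====
-- import re
--
-- def isalphanum(string):
--     return bool(re.fullmatch(r'[A-Za-z0-9_-]*', string))
-- ===== Notes on version B (the rewrite author's own statement) =====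
-- stated objective: idiomatic
-- what changed: Replaced the explicit per-character membership loop over a 64-element list with a single regex full-match against the character class [A-Za-z0-9_-]*.
import Mathlib
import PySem

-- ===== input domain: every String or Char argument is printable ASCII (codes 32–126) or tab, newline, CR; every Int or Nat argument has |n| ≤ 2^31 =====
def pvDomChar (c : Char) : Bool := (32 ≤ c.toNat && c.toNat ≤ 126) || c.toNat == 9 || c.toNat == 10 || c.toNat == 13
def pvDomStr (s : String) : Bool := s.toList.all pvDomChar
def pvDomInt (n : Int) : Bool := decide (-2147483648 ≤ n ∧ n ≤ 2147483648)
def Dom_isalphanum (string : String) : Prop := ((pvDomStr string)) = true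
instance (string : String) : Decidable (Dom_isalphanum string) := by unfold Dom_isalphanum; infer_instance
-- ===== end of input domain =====

-- B replaces A's explicit membership loop over a 64-element list with one regex
-- full-match against the character class [A-Za-z0-9_-]* (idiomatic; return value only).

-- ===== PORT A =====
-- A's literal list of allowed one-character strings (ported as Char)
def isalphanumDic : List Char :=
  ['a','b','c','d','e','f','g','h','i','j','k','l','m','n','o','p','q','r','s','t',
   'u','v','w','x','y','z','A','B','C','D','E','F','G','H','I','J','K','L','M','N',
   'O','P','Q','R','S','T','U','V','W','X','Y','Z','1','2','3','4','5','6','7','8',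
   '9','0','-','_']

-- A's loop: early-return False on the first char not in dic
def isalphanumLoop : List Char → Bool
  | [] => true
  | c :: rest => if !(isalphanumDic.contains c) then false else isalphanumLoop rest

def isalphanum (string : String) : Bool := isalphanumLoop string.toList

-- ===== PORT B =====
-- re.fullmatch(r'[A-Za-z0-9_-]*', s): the regex engine matches every character of s
-- against the class [A-Za-z0-9_-]; ported exactly as that class test over the whole string.
def isalphanumClass (c : Char) : Bool :=
  ('A' ≤ c && c ≤ 'Z') || ('a' ≤ c && c ≤ 'z') || ('0' ≤ c && c ≤ '9') || c == '_' || c == '-'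

def isalphanum_alt (string : String) : Bool := string.toList.all isalphanumClass

-- ===== PRECONDITION & SPEC =====
def Spec_isalphanum (string : String) (out : Bool) : Prop := out = isalphanum_alt string
instance (string : String) (out : Bool) : Decidable (Spec_isalphanum string out) := by unfold Spec_isalphanum; infer_instance

-- ===== CLAIM (what is proved, stated in full; the proofs are below) =====
def Claim_equal_isalphanum : Prop := ∀ (string : String), Dom_isalphanum string → Spec_isalphanum string (isalphanum string)

-- ===== LEMMAS AND PROOFS =====

-- every allowed char in Dom: list membership agrees with the character-class test
theorem class_eq_mem (c : Char) (h : pvDomChar c = true) :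
    isalphanumDic.contains c = isalphanumClass c := by
  have hlt : c.toNat < 128 := by
    simp only [pvDomChar, Bool.or_eq_true, Bool.and_eq_true, decide_eq_true_eq, beq_iff_eq] at h
    omega
  have hall : ∀ n : Fin 128, isalphanumDic.contains (Char.ofNat n.val) = isalphanumClass (Char.ofNat n.val) := by decide
  have hc : Char.ofNat c.toNat = c := Char.ofNat_toNat c
  have := hall ⟨c.toNat, hlt⟩
  simpa [hc] using this

theorem loop_eq_all (l : List Char) (h : l.all pvDomChar = true) :
    isalphanumLoop l = l.all isalphanumClass := by
  induction l with
  | nil => rfl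
  | cons c rest ih =>
    simp only [List.all_cons, Bool.and_eq_true] at h
    simp only [isalphanumLoop, List.all_cons, class_eq_mem c h.1, ih h.2]
    cases isalphanumClass c <;> simp

-- ===== VERDICT (by name: the statement is the Claim_ definition above) =====
theorem isalphanum_spec : Claim_equal_isalphanum := by
  intro s hd
  unfold Spec_isalphanum isalphanum isalphanum_alt
  exact loop_eq_all _ hd
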